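-- pv_equiv track=rewrite | github.com/Entropy-xcy/sns_v3 | sns_v3/sequence/evaluate.py | table_to_io_examples
-- ===== SOURCE A (Python) =====
-- from typing import List, AnyStr, Optional
--
-- def int_to_bool_list(num: int, align=8) -> List[bool]:
--     ret = []
--     for i in range(align):
--         ret.append(bool(num & 1))
--         num >>= 1
--     ret.reverse()
--     return ret
--
-- def table_to_io_examples(table: List[int]) -> List[List[bool]]:
--     ret = []
--     for i in range(len(table)):
--         o = table[i]
--         # i to bool list
--         i_bin = int_to_bool_list(i)
--         o_bin = int_to_bool_list(o)
--         tup = (i_bin, o_bin)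
--         ret.append(tup)
--     return ret
-- ===== SOURCE B (Python) =====
-- def table_to_io_examples(table):
--     return [([c == '1' for c in format(i & 0xFF, '08b')],
--              [c == '1' for c in format(o & 0xFF, '08b')])
--             for i, o in enumerate(table)]
-- ===== Notes on version B (the rewrite author's own statement) =====
-- stated objective: idiomatic
-- what changed: The bit-by-bit append/shift/reverse loop of int_to_bool_list is replaced by a closed-form conversion [c == '1' for c in format(n & 0xFF, '08b')], and the index-based outer loop by a comprehension over enumerate(table).
import Mathlib
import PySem

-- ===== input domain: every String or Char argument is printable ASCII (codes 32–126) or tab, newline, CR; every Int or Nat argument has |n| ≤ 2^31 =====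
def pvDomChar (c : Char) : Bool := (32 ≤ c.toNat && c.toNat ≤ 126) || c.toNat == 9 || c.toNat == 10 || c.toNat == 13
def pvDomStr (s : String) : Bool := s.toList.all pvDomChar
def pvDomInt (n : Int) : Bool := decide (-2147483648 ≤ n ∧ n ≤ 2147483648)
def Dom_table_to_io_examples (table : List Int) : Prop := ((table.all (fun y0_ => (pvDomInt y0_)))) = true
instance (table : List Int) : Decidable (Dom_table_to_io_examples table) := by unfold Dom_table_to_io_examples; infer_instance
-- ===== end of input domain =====

-- B replaces A's shift-append-reverse bit loop by a closed-form MSB-first conversion (format(num & 0xFF,'08b')); objective: idiomatic.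

-- ===== PORT A =====
-- int_to_bool_list: for i in range(align): ret.append(bool(num & 1)); num >>= 1; then ret.reverse()
-- (num & 1 is truthy iff num mod 2 = 1; num >>= 1 is floor division by 2)
def int_to_bool_list (num : Int) (align : Int) : List Bool :=
  let st := (List.range align.toNat).foldl
    (fun (st : List Bool × Int) _ =>
      (st.1 ++ [decide (PySem.Int.mod st.2 2 = 1)], PySem.Int.floordiv st.2 2))
    ([], num)
  st.1.reverse

def table_to_io_examples (table : List Int) : List (List Bool × List Bool) :=
  (List.range table.length).foldl
    (fun ret i =>
      let o := table.getD i 0   -- table[i]; i always in range here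
      ret ++ [(int_to_bool_list (Int.ofNat i) 8, int_to_bool_list o 8)])
    []

-- ===== PORT B =====
-- [c == '1' for c in format(num & 0xFF, '08b')]: character k of the 8-char binary string of
-- m = num & 0xFF (= num mod 256, nonnegative) is '1' iff bit (7-k) of m is 1; exact since 0 ≤ m < 256.
def bits8 (num : Int) : List Bool :=
  let m := PySem.Int.mod num 256
  (List.range 8).map (fun k => decide (PySem.Int.mod (PySem.Int.floordiv m (2 ^ (7 - k))) 2 = 1))

def table_to_io_examples_alt (table : List Int) : List (List Bool × List Bool) :=
  (PySem.List.enumerate table).map (fun io => (bits8 io.1, bits8 io.2))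

-- ===== PRECONDITION & SPEC =====
def Spec_table_to_io_examples (table : List Int) (out : List (List Bool × List Bool)) : Prop := out = table_to_io_examples_alt table
instance (table : List Int) (out : List (List Bool × List Bool)) : Decidable (Spec_table_to_io_examples table out) := by unfold Spec_table_to_io_examples; infer_instance

-- ===== CLAIM (what is proved, stated in full; the proofs are below) =====
def Claim_equal_table_to_io_examples : Prop := ∀ (table : List Int), Dom_table_to_io_examples table → Spec_table_to_io_examples table (table_to_io_examples table)

-- ===== LEMMAS AND PROOFS =====

theorem bits_eq (num : Int) : int_to_bool_list num 8 = bits8 num := by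
  norm_num [int_to_bool_list, bits8, List.range_succ,
    PySem.Int.floordiv_eq_ediv_of_pos (show (0:Int) < 1 by norm_num),
    PySem.Int.floordiv_eq_ediv_of_pos (show (0:Int) < 2 by norm_num),
    PySem.Int.floordiv_eq_ediv_of_pos (show (0:Int) < 4 by norm_num),
    PySem.Int.floordiv_eq_ediv_of_pos (show (0:Int) < 8 by norm_num),
    PySem.Int.floordiv_eq_ediv_of_pos (show (0:Int) < 16 by norm_num),
    PySem.Int.floordiv_eq_ediv_of_pos (show (0:Int) < 32 by norm_num),
    PySem.Int.floordiv_eq_ediv_of_pos (show (0:Int) < 64 by norm_num),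
    PySem.Int.floordiv_eq_ediv_of_pos (show (0:Int) < 128 by norm_num),
    PySem.Int.mod_eq_emod_of_pos (show (0:Int) < 2 by norm_num),
    PySem.Int.mod_eq_emod_of_pos (show (0:Int) < 256 by norm_num),
    show (8:Int).toNat = 8 from rfl, decide_eq_decide]
  omega

theorem fold_append_map {α β : Type} (f : α → β) :
    ∀ (l : List α) (acc : List β),
      l.foldl (fun r i => r ++ [f i]) acc = acc ++ l.map f := by
  intro l
  induction l with
  | nil => simp
  | cons x xs ih => intro acc; simp [ih]

-- ===== VERDICT (by name: the statement is the Claim_ definition above) =====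
theorem table_to_io_examples_spec : Claim_equal_table_to_io_examples := by
  intro table _
  unfold Spec_table_to_io_examples table_to_io_examples table_to_io_examples_alt
  rw [fold_append_map]
  apply List.ext_getElem
  · simp [PySem.List.length_enumerate]
  · intro k h1 h2
    simp [PySem.List.getElem_enumerate, bits_eq, List.getD,
      List.getElem?_eq_getElem (by simpa using h2)]
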